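-- pv_equiv track=rewrite | github.com/redfast00/aoc2024 | day_12/solve.py | calc_perimeter
-- ===== SOURCE A (Python) =====
-- directions = [
--     (-1, 0), # up
--     (0, 1), # right
--     (1, 0), # down
--     (0, -1) # left
-- ]
--
-- def calc_perimeter(region):
--     total = 0
--     for (x, y) in region:
--         for (dx, dy) in directions:
--             new_coord = (x+dx, y+dy)
--             if new_coord not in region:
--                 total += 1
--     return total
-- ===== SOURCE B (Python) =====
-- directions = [
--     (-1, 0), # up
--     (0, 1), # right
--     (1, 0), # down
--     (0, -1) # left
-- ]
--
-- def calc_perimeter(region):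
--     cells = set(region)
--     edges = 0
--     for (x, y) in region:
--         if (x, y + 1) in cells:
--             edges += 1
--         if (x + 1, y) in cells:
--             edges += 1
--     return 4 * len(region) - 2 * edges
-- ===== Notes on version B (the rewrite author's own statement) =====
-- stated objective: alternative
-- what changed: Instead of counting open faces in all four directions per cell, B counts each internal adjacency exactly once by checking only the right and down neighbours and returns 4*len(region) - 2*edges, relying on the up/down and left/right symmetry of adjacency over a set of distinct cells.
import Mathlib
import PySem

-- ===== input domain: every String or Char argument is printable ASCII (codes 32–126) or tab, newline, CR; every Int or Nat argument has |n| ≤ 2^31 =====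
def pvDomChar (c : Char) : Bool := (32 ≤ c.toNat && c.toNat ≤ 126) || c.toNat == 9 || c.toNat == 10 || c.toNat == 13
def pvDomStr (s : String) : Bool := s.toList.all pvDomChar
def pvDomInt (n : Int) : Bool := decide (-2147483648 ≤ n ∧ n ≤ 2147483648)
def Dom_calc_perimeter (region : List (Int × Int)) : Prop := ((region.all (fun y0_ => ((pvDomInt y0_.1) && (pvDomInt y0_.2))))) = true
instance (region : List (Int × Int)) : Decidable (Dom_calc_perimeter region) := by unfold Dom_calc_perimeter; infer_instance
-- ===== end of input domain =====

-- B counts each internal adjacency once (right/down neighbour only) and returns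
-- 4*len(region) - 2*edges, instead of counting open faces in all four directions per cell
-- (a different decomposition of the perimeter; same cost).

-- ===== PORT A =====
def directions : List (Int × Int) := [(-1, 0), (0, 1), (1, 0), (0, -1)]

def calc_perimeter (region : List (Int × Int)) : Int :=
  region.foldl (fun total c =>
    directions.foldl (fun t d =>
      let new_coord := (c.1 + d.1, c.2 + d.2)
      if new_coord ∉ region then t + 1 else t) total) 0

-- ===== PORT B =====
def calc_perimeter_alt (region : List (Int × Int)) : Int :=
  let cells := PySem.Set.ofList region
  let edges : Int := region.foldl (fun e c =>
    let e := if (c.1, c.2 + 1) ∈ cells then e + 1 else e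
    if (c.1 + 1, c.2) ∈ cells then e + 1 else e) 0
  4 * (region.length : Int) - 2 * edges

-- ===== PRECONDITION & SPEC =====
-- region is a Python set (set[tuple[int,int]] -> List (Int × Int) of DISTINCT elements);
-- Pre_ states exactly that set invariant (Nodup), so it excludes no input A is called on.
def Pre_calc_perimeter (region : List (Int × Int)) : Prop := region.Nodup
instance (region : List (Int × Int)) : Decidable (Pre_calc_perimeter region) := by unfold Pre_calc_perimeter; infer_instance
def pvWitness_calc_perimeter : (List (Int × Int)) := [(0, 0), (0, 1), (1, 0)]

def Spec_calc_perimeter (region : List (Int × Int)) (out : Int) : Prop := out = calc_perimeter_alt region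
instance (region : List (Int × Int)) (out : Int) : Decidable (Spec_calc_perimeter region out) := by unfold Spec_calc_perimeter; infer_instance

-- ===== CLAIM (what is proved, stated in full; the proofs are below) =====
def Claim_equal_calc_perimeter : Prop := ∀ (region : List (Int × Int)), Dom_calc_perimeter region → Pre_calc_perimeter region → Spec_calc_perimeter region (calc_perimeter region)

-- ===== LEMMAS AND PROOFS =====

-- indicator: 1 if the neighbour of c in direction d lies in region
def ind (region : List (Int × Int)) (d c : Int × Int) : Int :=
  if (c.1 + d.1, c.2 + d.2) ∈ region then 1 else 0

def gA (region : List (Int × Int)) (c : Int × Int) : Int :=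
  4 - (ind region (-1, 0) c + ind region (0, 1) c + ind region (1, 0) c + ind region (0, -1) c)

def gB (region : List (Int × Int)) (c : Int × Int) : Int :=
  ind region (0, 1) c + ind region (1, 0) c

lemma foldA_eq (region : List (Int × Int)) :
    ∀ (l : List (Int × Int)) (acc : Int),
      l.foldl (fun total c =>
        directions.foldl (fun t d =>
          if (c.1 + d.1, c.2 + d.2) ∉ region then t + 1 else t) total) acc
      = acc + (l.map (gA region)).sum := by
  intro l
  induction l with
  | nil => intro acc; simp
  | cons a l ih =>
    intro acc
    simp only [List.foldl_cons, List.map_cons, List.sum_cons, ih]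
    have : directions.foldl (fun t d =>
          if (a.1 + d.1, a.2 + d.2) ∉ region then t + 1 else t) acc = acc + gA region a := by
      simp only [directions, List.foldl_cons, List.foldl_nil, gA, ind]
      split_ifs <;> omega
    rw [this]; ring

lemma foldB_eq (region : List (Int × Int)) :
    ∀ (l : List (Int × Int)) (acc : Int),
      l.foldl (fun e c =>
        (fun e => if (c.1 + 1, c.2) ∈ PySem.Set.ofList region then e + 1 else e)
          (if (c.1, c.2 + 1) ∈ PySem.Set.ofList region then e + 1 else e)) acc
      = acc + (l.map (gB region)).sum := by
  intro l
  induction l with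
  | nil => intro acc; simp
  | cons a l ih =>
    intro acc
    rw [List.foldl_cons, ih]
    simp only [List.map_cons, List.sum_cons, gB, ind, PySem.Set.mem_ofList, add_zero]
    split_ifs <;> ring

lemma sum_gA (region l : List (Int × Int)) :
    (l.map (gA region)).sum
      = 4 * (l.length : Int)
        - ((l.map (ind region (-1, 0))).sum + (l.map (ind region (0, 1))).sum
           + (l.map (ind region (1, 0))).sum + (l.map (ind region (0, -1))).sum) := by
  induction l with
  | nil => simp
  | cons a l ih =>
    simp only [List.map_cons, List.sum_cons, List.length_cons, gA, ih]
    push_cast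
    ring

lemma sum_ind_eq_filter (region : List (Int × Int)) (d : Int × Int) (l : List (Int × Int)) :
    (l.map (ind region d)).sum
      = ((l.filter (fun c => (c.1 + d.1, c.2 + d.2) ∈ region)).length : Int) := by
  induction l with
  | nil => simp
  | cons a l ih =>
    by_cases h : (a.1 + d.1, a.2 + d.2) ∈ region <;>
      simp [ind, h, ih] <;> push_cast <;> ring

lemma filter_symm (region : List (Int × Int)) (h : region.Nodup) (dx dy : Int) :
    (region.filter (fun c => (c.1 + dx, c.2 + dy) ∈ region)).length
      = (region.filter (fun c => (c.1 - dx, c.2 - dy) ∈ region)).length := by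
  have key : ∀ (p : Int × Int → Bool),
      (region.filter p).length = (region.toFinset.filter (fun a => p a = true)).card := by
    intro p
    rw [← List.toFinset_filter]
    exact (List.toFinset_card_of_nodup (h.filter p)).symm
  rw [key, key]
  apply Finset.card_bij' (fun c _ => ((c.1 + dx, c.2 + dy) : Int × Int))
    (fun c _ => ((c.1 - dx, c.2 - dy) : Int × Int))
  · intro a ha
    simp only [Finset.mem_filter, List.mem_toFinset, decide_eq_true_eq] at ha ⊢
    constructor
    · exact ha.2
    · have : (a.1 + dx - dx, a.2 + dy - dy) = a := by
        apply Prod.ext <;> simp <;> ring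
      rw [this]; exact ha.1
  · intro b hb
    simp only [Finset.mem_filter, List.mem_toFinset, decide_eq_true_eq] at hb ⊢
    constructor
    · exact hb.2
    · have : (b.1 - dx + dx, b.2 - dy + dy) = b := by
        apply Prod.ext <;> simp <;> ring
      rw [this]; exact hb.1
  · intro a _; apply Prod.ext <;> simp <;> ring
  · intro b _; apply Prod.ext <;> simp <;> ring

-- ===== VERDICT (by name: the statement is the Claim_ definition above) =====
theorem calc_perimeter_spec : Claim_equal_calc_perimeter := by
  intro region _ hpre
  unfold Spec_calc_perimeter
  simp only [calc_perimeter, calc_perimeter_alt]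
  rw [foldA_eq region region 0, foldB_eq region region 0]
  rw [sum_gA]
  rw [sum_ind_eq_filter, sum_ind_eq_filter, sum_ind_eq_filter, sum_ind_eq_filter]
  have hud := filter_symm region hpre (-1) 0
  have hlr := filter_symm region hpre 0 (-1)
  have hB : (region.map (gB region)).sum
      = ((region.filter (fun c => (c.1 + 0, c.2 + 1) ∈ region)).length : Int)
        + ((region.filter (fun c => (c.1 + 1, c.2 + 0) ∈ region)).length : Int) := by
    have : ∀ l : List (Int × Int), (l.map (gB region)).sum
        = (l.map (ind region (0, 1))).sum + (l.map (ind region (1, 0))).sum := by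
      intro l; induction l with
      | nil => simp
      | cons a l ih => simp only [List.map_cons, List.sum_cons, gB, ih]; ring
    rw [this, sum_ind_eq_filter, sum_ind_eq_filter]
  rw [hB]
  have e1 : (region.filter (fun c => (c.1 + -1, c.2 + 0) ∈ region)).length
      = (region.filter (fun c => (c.1 + 1, c.2 + 0) ∈ region)).length := by
    have := filter_symm region hpre (-1) 0
    simpa [sub_eq_add_neg] using this
  have e2 : (region.filter (fun c => (c.1 + 0, c.2 + -1) ∈ region)).length
      = (region.filter (fun c => (c.1 + 0, c.2 + 1) ∈ region)).length := by
    have := filter_symm region hpre 0 (-1)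
    simpa [sub_eq_add_neg] using this
  rw [e1, e2]
  ring
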